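-- pv_equiv track=rewrite | github.com/harini-ashok/Resume-Parser | utils.py | search_college_from_text
-- ===== SOURCE A (Python) =====
-- def search_college_from_text(text, l):
--     pos = []
--     names = []
--     for val in l:
--         x = text.find(val)
--         if(x!=-1):
--             pos.append(x)
--             names.append(val)
--     return pos, names
-- ===== SOURCE B (Python) =====
-- def search_college_from_text(text, l):
--     # Index every position of each character once, then for each word scan only
--     # the positions of its first character for a full match (first hit wins).
--     index = {}
--     for i, ch in enumerate(text):
--         index.setdefault(ch, []).append(i)
--     pos = []
--     names = []
--     for v in l:
--         if not v:
--             pos.append(0)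
--             names.append(v)
--             continue
--         for i in index.get(v[0], []):
--             if text.startswith(v, i):
--                 pos.append(i)
--                 names.append(v)
--                 break
--     return pos, names
-- ===== Notes on version B (the rewrite author's own statement) =====
-- stated objective: alternative
-- what changed: B builds a one-pass character-position index of the text and, for each word, checks a full match only at the positions of its first character (first hit wins), instead of calling text.find per word.
import Mathlib
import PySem

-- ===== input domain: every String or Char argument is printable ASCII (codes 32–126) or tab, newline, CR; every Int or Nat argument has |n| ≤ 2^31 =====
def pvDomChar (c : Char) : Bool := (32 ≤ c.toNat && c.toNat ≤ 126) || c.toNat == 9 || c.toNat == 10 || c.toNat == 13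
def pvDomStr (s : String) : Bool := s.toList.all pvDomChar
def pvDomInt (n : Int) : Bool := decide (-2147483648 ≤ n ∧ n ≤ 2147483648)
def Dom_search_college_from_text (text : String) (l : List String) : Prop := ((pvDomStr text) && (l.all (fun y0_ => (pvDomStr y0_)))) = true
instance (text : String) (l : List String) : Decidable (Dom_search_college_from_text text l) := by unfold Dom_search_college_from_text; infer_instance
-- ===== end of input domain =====

-- B replaces per-word text.find with a one-pass char-position index plus a full-match check
-- only at the positions of the word's first character (alternative decomposition, no speed claim).

-- ===== PORT A =====
def search_college_from_text (text : String) (l : List String) : List Int × List String :=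
  l.foldl (fun acc val =>
    let x := PySem.Str.find text val
    if x ≠ -1 then (acc.1 ++ [x], acc.2 ++ [val]) else acc) ([], [])

-- ===== PORT B =====
-- index.setdefault(ch, []).append(i) over enumerate(text)
def scftIndex (t : List Char) : PySem.Dict Char (List Int) :=
  (PySem.List.enumerate t 0).foldl (fun d p => d.modify p.2 [] (· ++ [p.1])) PySem.Dict.empty

-- Source B's per-word body: '' at 0; else first i among index[v[0]] with text.startswith(v, i)
-- (index positions are always 0 <= i < len(text), where startswith(v, i) is exactly a prefix of drop i)
def scftFirst (t : List Char) (idx : PySem.Dict Char (List Int)) (v : String) : Option Int :=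
  match v.toList with
  | [] => some 0
  | c :: _ =>
      (idx.getD c []).find? (fun i => PySem.Chars.startswith (t.drop i.toNat) v.toList)

def search_college_from_text_alt (text : String) (l : List String) : List Int × List String :=
  let idx := scftIndex text.toList
  l.foldl (fun acc v =>
    match scftFirst text.toList idx v with
    | some i => (acc.1 ++ [i], acc.2 ++ [v])
    | none => acc) ([], [])

-- ===== PRECONDITION & SPEC =====
def Spec_search_college_from_text (text : String) (l : List String) (out : List Int × List String) : Prop := out = search_college_from_text_alt text l
instance (text : String) (l : List String) (out : List Int × List String) : Decidable (Spec_search_college_from_text text l out) := by unfold Spec_search_college_from_text; infer_instance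

-- ===== CLAIM (what is proved, stated in full; the proofs are below) =====
def Claim_equal_search_college_from_text : Prop := ∀ (text : String) (l : List String), Dom_search_college_from_text text l → Spec_search_college_from_text text l (search_college_from_text text l)

-- ===== LEMMAS AND PROOFS =====

theorem scft_find?_sorted (p : Int → Bool) (xs : List Int) (x : Int)
    (hs : xs.Pairwise (· < ·)) (hx : x ∈ xs) (hpx : p x = true)
    (hmin : ∀ y ∈ xs, y < x → p y = false) : xs.find? p = some x := by
  induction xs with
  | nil => cases hx
  | cons a rest ih =>
      rcases List.pairwise_cons.mp hs with ⟨ha, hrest⟩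
      rcases List.mem_cons.mp hx with rfl | hxr
      · simp [List.find?, hpx]
      · have hpa : p a = false := hmin a (List.mem_cons_self) (ha x hxr)
        simp only [List.find?, hpa]
        exact ih hrest hxr (fun y hy hyx => hmin y (List.mem_cons_of_mem a hy) hyx)

theorem scft_pred_iff (t w : List Char) (k : Nat) :
    PySem.Chars.startswith (t.drop ((k : Int)).toNat) w = true ↔ w <+: t.drop k := by
  rw [Int.toNat_natCast, PySem.Chars.startswith_iff]

theorem scft_occ (t : List Char) (c : Char) :
    (scftIndex t).getD c [] = ((PySem.List.enumerate t 0).filter (fun p => p.2 == c)).map (·.1) := by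
  unfold scftIndex
  have h : (PySem.List.enumerate t 0).foldl (fun d p => d.modify p.2 [] (· ++ [p.1])) (PySem.Dict.empty : PySem.Dict Char (List Int))
      = ((PySem.List.enumerate t 0).map Prod.swap).foldl (fun d q => d.modify q.1 [] (· ++ [q.2])) PySem.Dict.empty := by
    rw [List.foldl_map]
    simp only [Prod.fst_swap, Prod.snd_swap]
  rw [h, PySem.Dict.getD_foldl_modify_append]
  simp [List.filter_map, List.map_map, Function.comp_def]

theorem scft_mem_occ (t : List Char) (c : Char) (x : Int) :
    x ∈ (scftIndex t).getD c [] ↔ ∃ (k : Nat) (h : k < t.length), x = (k : Int) ∧ t[k] = c := by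
  rw [scft_occ]
  simp only [List.mem_map, List.mem_filter, PySem.List.mem_enumerate_iff]
  constructor
  · rintro ⟨p, ⟨⟨k, hk, rfl⟩, hc⟩, rfl⟩
    exact ⟨k, hk, by simp, by simpa using hc⟩
  · rintro ⟨k, hk, rfl, hc⟩
    exact ⟨(0 + (k : Int), t[k]), ⟨⟨k, hk, rfl⟩, by simpa using hc⟩, by simp⟩

theorem scft_first_eq (t : List Char) (v : String) :
    scftFirst t (scftIndex t) v =
      (if PySem.Chars.find t v.toList = -1 then none else some (PySem.Chars.find t v.toList)) := by
  unfold scftFirst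
  rcases hv : v.toList with _ | ⟨c, rest⟩
  · simp [PySem.Chars.find_nil]
  · show (((scftIndex t).getD c []).find?
        (fun i => PySem.Chars.startswith (t.drop i.toNat) (c :: rest))) =
      (if PySem.Chars.find t (c :: rest) = -1 then none else some (PySem.Chars.find t (c :: rest)))
    set w : List Char := c :: rest with hw
    by_cases hfind : PySem.Chars.find t w = -1
    · rw [if_pos hfind]
      apply List.find?_eq_none.mpr
      intro x hx
      rcases (scft_mem_occ t c x).mp hx with ⟨k, hk, rfl, hck⟩
      simp only [Bool.not_eq_true]
      rw [Bool.eq_false_iff]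
      intro hpd
      have hpre : w <+: t.drop k := (scft_pred_iff t w k).mp (by simpa using hpd)
      have hinf : w <:+: t := hpre.isInfix.trans (List.drop_suffix k t).isInfix
      exact (PySem.Chars.find_eq_neg_one_iff t w).mp hfind hinf
    · rw [if_neg hfind]
      have h0 : 0 ≤ PySem.Chars.find t w := by
        have := PySem.Chars.neg_one_le_find (s := t) (sub := w)
        omega
      obtain ⟨hpre, hmin⟩ := PySem.Chars.find_spec (s := t) (sub := w) h0
      set j0 : Nat := (PySem.Chars.find t w).toNat with hj0
      have hjlen : j0 < t.length := by
        have h1 := hpre.length_le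
        have h2 : (t.drop j0).length = t.length - j0 := List.length_drop
        simp [hw] at h1
        omega
      have hdrop : t[j0] = c := by
        rcases hpre with ⟨s, hs⟩
        have : t.drop j0 = c :: (rest ++ s) := by rw [← hs]; simp [hw]
        have h2 : t[j0]? = some c := by
          rw [← List.head?_drop, this]; rfl
        exact Option.some_injective _ (by rw [← List.getElem?_eq_getElem hjlen, h2])
      have hfval : PySem.Chars.find t w = (j0 : Int) := (Int.toNat_of_nonneg h0).symm
      rw [hfval]
      apply scft_find?_sorted
      · rw [scft_occ]
        exact (List.pairwise_map).mpr
          ((PySem.List.pairwise_lt_enumerate t 0).filter _)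
      · exact (scft_mem_occ t c _).mpr ⟨j0, hjlen, rfl, hdrop⟩
      · exact (by simpa using (scft_pred_iff t w j0).mpr hpre)
      · intro y hy hylt
        rcases (scft_mem_occ t c y).mp hy with ⟨k, hk, rfl, hck⟩
        rw [Bool.eq_false_iff]
        intro hpd
        have : w <+: t.drop k := (scft_pred_iff t w k).mp (by simpa using hpd)
        exact hmin k (by exact_mod_cast hylt) this

-- ===== VERDICT (by name: the statement is the Claim_ definition above) =====
theorem search_college_from_text_spec : Claim_equal_search_college_from_text := by
  intro text l _
  unfold Spec_search_college_from_text search_college_from_text search_college_from_text_alt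
  have hstep : ∀ (acc : List Int × List String) (v : String),
      (let x := PySem.Str.find text v;
       if x ≠ -1 then (acc.1 ++ [x], acc.2 ++ [v]) else acc)
      = (match scftFirst text.toList (scftIndex text.toList) v with
         | some i => (acc.1 ++ [i], acc.2 ++ [v])
         | none => acc) := by
    intro acc v
    rw [scft_first_eq]
    have : PySem.Str.find text v = PySem.Chars.find text.toList v.toList := by
      simp [PySem.Str.find_eq]
    rw [this]
    by_cases h : PySem.Chars.find text.toList v.toList = -1 <;> simp [h]
  simp only [hstep]
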